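-- pv_equiv track=rewrite | github.com/IlyaOrlov/PythonCourse2.0_May23 | Practice/Svetlova/DZ5.4.py | remove_column
-- ===== SOURCE A (Python) =====
-- def remove_column(matrix, digit):
--     num_columns = len(matrix[0])
--     indices_to_remove = set()
--     for i in range(num_columns):
--         if any(row[i] == digit for row in matrix):
--             indices_to_remove.add(i)
--     new_matrix = []
--     for row in matrix:
--         new_row = [row[i] for i in range(num_columns) if i not in indices_to_remove]
--         new_matrix.append(new_row)
--     return new_matrix
--
-- matrix = [[1, 2, 3],
--           [4, 5, 6],
--           [7, 8, 9]]
--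
-- new_matrix = remove_column(matrix, 3)
-- ===== SOURCE B (Python) =====
-- def remove_column(matrix, digit):
--     kept = [col for col in zip(*matrix, strict=True) if digit not in col]
--     if not kept:
--         return [[] for _ in matrix]
--     return [list(row) for row in zip(*kept)]
-- ===== Notes on version B (the rewrite author's own statement) =====
-- stated objective: alternative
-- what changed: B transposes the matrix into columns with zip(*matrix, strict=True), filters out whole columns containing the digit, and transposes back, instead of A's two index-based passes building a set of column indices to remove.
-- outside the precondition, e.g. on remove_column([[1], [2, 3]], 1): A returns [[], []], B raises ValueError
import Mathlib
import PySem

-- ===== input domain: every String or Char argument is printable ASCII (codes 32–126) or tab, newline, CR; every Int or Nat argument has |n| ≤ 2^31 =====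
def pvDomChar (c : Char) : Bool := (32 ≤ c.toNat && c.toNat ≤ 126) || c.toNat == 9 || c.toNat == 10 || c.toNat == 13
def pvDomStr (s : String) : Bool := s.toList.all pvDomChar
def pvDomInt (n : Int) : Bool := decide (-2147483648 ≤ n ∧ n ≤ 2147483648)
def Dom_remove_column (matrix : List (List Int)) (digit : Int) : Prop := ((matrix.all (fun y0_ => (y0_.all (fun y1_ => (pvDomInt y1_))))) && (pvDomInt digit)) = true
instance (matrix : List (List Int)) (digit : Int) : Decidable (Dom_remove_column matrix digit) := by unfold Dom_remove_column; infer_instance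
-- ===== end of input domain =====

-- B removes value-containing columns by transposing (zip strict), filtering whole columns, and
-- transposing back, instead of A's two index-based passes over a set of removed indices.

-- ===== PORT A =====
def remove_column (matrix : List (List Int)) (digit : Int) : List (List Int) :=
  let num_columns : Int := ((matrix.headD []).length : Int)
  let indices_to_remove : PySem.Set Int :=
    (PySem.List.pyRange 0 num_columns 1).foldl
      (fun s i => if matrix.any (fun row => PySem.List.pyGetD row i 0 == digit)
                  then PySem.Set.add s i else s)
      PySem.Set.empty
  matrix.foldl
    (fun new_matrix row =>
      new_matrix ++ [(PySem.List.pyRange 0 num_columns 1).foldl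
        (fun new_row i => if !(PySem.Set.contains indices_to_remove i)
                          then new_row ++ [PySem.List.pyGetD row i 0] else new_row) []])
    []

-- ===== PORT B =====
-- zip(*m, strict=True): the columns of m; exact on rectangular m (where strict zip returns;
-- on ragged m the Python raises ValueError — those inputs are outside Pre_ below)
def pyZipStrict (m : List (List Int)) : List (List Int) :=
  match m with
  | [] => []
  | r :: _ => (List.range r.length).map (fun i => m.map (fun row => row.getD i 0))

def remove_column_alt (matrix : List (List Int)) (digit : Int) : List (List Int) :=
  let kept := (pyZipStrict matrix).filter (fun col => !(col.contains digit))
  if kept.isEmpty then matrix.map (fun _ => [])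
  else pyZipStrict kept

-- ===== PRECONDITION & SPEC =====
-- Pre_ excludes the empty matrix and ragged matrices: A raises IndexError on the empty
-- matrix and on rows shorter than the first row, silently drops trailing cells of rows
-- longer than the first row, and B's strict zip raises ValueError on any ragged matrix.
def Pre_remove_column (matrix : List (List Int)) (digit : Int) : Prop :=
  matrix ≠ [] ∧ ∀ r ∈ matrix, r.length = (matrix.headD []).length
instance (matrix : List (List Int)) (digit : Int) : Decidable (Pre_remove_column matrix digit) := by
  unfold Pre_remove_column; infer_instance
def pvWitness_remove_column : List (List Int) × Int := ([[1, 2, 3], [4, 5, 6]], 2)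

def Spec_remove_column (matrix : List (List Int)) (digit : Int) (out : List (List Int)) : Prop := out = remove_column_alt matrix digit
instance (matrix : List (List Int)) (digit : Int) (out : List (List Int)) : Decidable (Spec_remove_column matrix digit out) := by unfold Spec_remove_column; infer_instance

-- ===== CLAIM (what is proved, stated in full; the proofs are below) =====
def Claim_equal_remove_column : Prop := ∀ (matrix : List (List Int)) (digit : Int), Dom_remove_column matrix digit → Pre_remove_column matrix digit → Spec_remove_column matrix digit (remove_column matrix digit)

-- ===== LEMMAS AND PROOFS =====

theorem mem_foldl_set_add_if {p : Int → Bool} (l : List Int) (s : PySem.Set Int) (j : Int) :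
    j ∈ l.foldl (fun s i => if p i then PySem.Set.add s i else s) s ↔ j ∈ s ∨ (j ∈ l ∧ p j = true) := by
  induction l generalizing s with
  | nil => simp
  | cons x xs ih =>
    simp only [List.foldl_cons, ih, List.mem_cons]
    by_cases hx : p x = true
    · simp only [hx, if_true, PySem.Set.mem_add]
      constructor
      · rintro (⟨h | rfl⟩ | h)
        · exact .inl h
        · exact .inr ⟨.inl rfl, hx⟩
        · exact .inr ⟨.inr h.1, h.2⟩
      · rintro (h | ⟨rfl | h, hp⟩)
        · exact .inl (.inl h)
        · exact .inl (.inr rfl)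
        · exact .inr ⟨h, hp⟩
    · simp only [hx]
      constructor
      · rintro (h | h)
        · exact .inl h
        · exact .inr ⟨.inr h.1, h.2⟩
      · rintro (h | ⟨rfl | h, hp⟩)
        · exact .inl h
        · exact absurd hp hx
        · exact .inr ⟨h, hp⟩

-- the selection common to both ports: keep entry i of a row iff no row has digit in column i
def goodIdx (matrix : List (List Int)) (digit : Int) (n : Nat) : List Nat :=
  (List.range n).filter (fun i => !(matrix.any (fun row => row.getD i 0 == digit)))

theorem remove_column_eq (matrix : List (List Int)) (digit : Int) :
    remove_column matrix digit =
      matrix.map (fun row =>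
        (goodIdx matrix digit (matrix.headD []).length).map (fun i => row.getD i 0)) := by
  unfold remove_column
  simp only []
  rw [PySem.List.foldl_append_singleton_eq_map, List.nil_append]
  apply List.map_congr_left
  intro row hrow
  rw [PySem.List.foldl_append_if, List.nil_append]
  have hfc : ∀ i ∈ PySem.List.pyRange 0 (((matrix.headD []).length : Int)) 1,
      (!(PySem.Set.contains
        ((PySem.List.pyRange 0 (((matrix.headD []).length : Int)) 1).foldl
          (fun s i => if matrix.any (fun row => PySem.List.pyGetD row i 0 == digit)
                      then PySem.Set.add s i else s) PySem.Set.empty) i))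
      = (!(matrix.any (fun row => PySem.List.pyGetD row i 0 == digit))) := by
    intro i hi
    congr 1
    rw [Bool.eq_iff_iff, PySem.Set.contains_iff, mem_foldl_set_add_if]
    constructor
    · rintro (h | ⟨_, hp⟩)
      · simp [PySem.Set.empty] at h
      · exact hp
    · intro h
      exact .inr ⟨hi, h⟩
  rw [List.filter_congr hfc]
  rw [PySem.List.pyRange_one]
  simp only [Int.sub_zero, Int.toNat_natCast, zero_add]
  rw [List.filter_map, List.map_map]
  unfold goodIdx
  have hfc2 : ∀ i ∈ List.range (matrix.headD []).length,
      ((fun i => !(matrix.any (fun row => PySem.List.pyGetD row i 0 == digit))) ∘ (fun k : Nat => (k : Int))) i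
      = (!(matrix.any (fun row => row.getD i 0 == digit))) := by
    intro i _
    simp [Function.comp, PySem.List.pyGetD_natCast]
  rw [List.filter_congr hfc2]
  apply List.map_congr_left
  intro i _
  simp [Function.comp, PySem.List.pyGetD_natCast]

theorem contains_map_eq_any (l : List (List Int)) (f : List Int → Int) (d : Int) :
    (l.map f).contains d = l.any (fun r => f r == d) := by
  rw [Bool.eq_iff_iff, List.contains_iff_mem, List.mem_map, List.any_eq_true]
  simp

theorem pyZipStrict_eq (m : List (List Int)) (hne : m ≠ []) :
    pyZipStrict m = (List.range (m.headD []).length).map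
      (fun i => m.map (fun row => row.getD i 0)) := by
  obtain ⟨r, rs, rfl⟩ := List.exists_cons_of_ne_nil hne
  rfl

theorem remove_column_alt_eq (matrix : List (List Int)) (digit : Int)
    (hpre : Pre_remove_column matrix digit) :
    remove_column_alt matrix digit =
      matrix.map (fun row =>
        (goodIdx matrix digit (matrix.headD []).length).map (fun i => row.getD i 0)) := by
  obtain ⟨hne, -⟩ := hpre
  unfold remove_column_alt
  simp only []
  rw [pyZipStrict_eq matrix hne, List.filter_map]
  have hfc : ∀ i ∈ List.range (matrix.headD []).length,
      ((fun col => !(col.contains digit)) ∘ (fun i => matrix.map (fun row => row.getD i 0))) i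
      = (!(matrix.any (fun row => row.getD i 0 == digit))) := by
    intro i _
    simp only [Function.comp]
    rw [contains_map_eq_any]
  rw [List.filter_congr hfc]
  rw [← goodIdx]
  by_cases hg : goodIdx matrix digit (matrix.headD []).length = []
  · rw [hg]
    simp
  · have hcols : (goodIdx matrix digit (matrix.headD []).length).map
        (fun i => matrix.map (fun row => row.getD i 0)) ≠ [] := by
      simpa using hg
    rw [if_neg (by simpa [List.isEmpty_iff] using hcols)]
    rw [pyZipStrict_eq _ hcols]
    have hhead : ((((goodIdx matrix digit (matrix.headD []).length).map
        (fun i => matrix.map (fun row => row.getD i 0))).headD []).length) = matrix.length := by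
      obtain ⟨c0, cs, hcc⟩ := List.exists_cons_of_ne_nil hcols
      rw [hcc, List.headD_cons]
      obtain ⟨i0, _, h0⟩ : ∃ i0, i0 ∈ goodIdx matrix digit (matrix.headD []).length ∧
          (fun i => matrix.map (fun row => row.getD i 0)) i0 = c0 := by
        have : c0 ∈ (goodIdx matrix digit (matrix.headD []).length).map
            (fun i => matrix.map (fun row => row.getD i 0)) := by rw [hcc]; simp
        simpa using this
      simp [← h0]
    rw [hhead]
    apply List.ext_getElem
    · simp
    · intro j h1 h2
      simp only [List.getElem_map, List.getElem_range, List.map_map]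
      apply List.map_congr_left
      intro i _
      simp only [Function.comp]
      have hj : j < matrix.length := by simpa using h1
      rw [List.getD_eq_getElem _ _ (by simpa using hj), List.getElem_map]

-- ===== VERDICT (by name: the statement is the Claim_ definition above) =====
theorem remove_column_spec : Claim_equal_remove_column := by
  intro matrix digit _ hpre
  unfold Spec_remove_column
  rw [remove_column_eq matrix digit, remove_column_alt_eq matrix digit hpre]
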